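-- pv_equiv track=rewrite | github.com/amuvarma13/bigds | multihead_mask_0.py | replace_specific_zeros_with_negative_hundred
-- ===== SOURCE A (Python) =====
-- def replace_specific_zeros_with_negative_hundred(example):
--     text_labels = example['text_labels']
--     audio_labels = example['audio_labels']
--
--     def process_labels(labels):
--         new_labels = labels.copy()
--         for i in range(1, len(labels) - 1):
--             if labels[i] == 0 and (labels[i-1] == 0 or labels[i+1] == 0):
--                 new_labels[i] = -100
--         return new_labels
--
--     example['text_labels'] = process_labels(text_labels)
--     example['audio_labels'] = process_labels(audio_labels)
--     return example
-- ===== SOURCE B (Python) =====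
-- def replace_specific_zeros_with_negative_hundred(example):
--     text_labels = example['text_labels']
--     audio_labels = example['audio_labels']
--
--     def process_labels(labels):
--         new_labels = labels.copy()
--         n = len(labels)
--         run_start = None
--         for j in range(n + 1):
--             if j < n and labels[j] == 0:
--                 if run_start is None:
--                     run_start = j
--             else:
--                 if run_start is not None and j - run_start >= 2:
--                     for k in range(max(run_start, 1), min(j, n - 1)):
--                         new_labels[k] = -100
--                 run_start = None
--         return new_labels
--
--     example['text_labels'] = process_labels(text_labels)
--     example['audio_labels'] = process_labels(audio_labels)
--     return example
-- ===== Notes on version B (the rewrite author's own statement) =====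
-- stated objective: alternative
-- what changed: B replaces A's per-index neighbour test with a single pass that tracks maximal runs of consecutive zeros and marks each run of length >= 2 (clamped to the interior indices 1..len-2) in the copied list.
import Mathlib
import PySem

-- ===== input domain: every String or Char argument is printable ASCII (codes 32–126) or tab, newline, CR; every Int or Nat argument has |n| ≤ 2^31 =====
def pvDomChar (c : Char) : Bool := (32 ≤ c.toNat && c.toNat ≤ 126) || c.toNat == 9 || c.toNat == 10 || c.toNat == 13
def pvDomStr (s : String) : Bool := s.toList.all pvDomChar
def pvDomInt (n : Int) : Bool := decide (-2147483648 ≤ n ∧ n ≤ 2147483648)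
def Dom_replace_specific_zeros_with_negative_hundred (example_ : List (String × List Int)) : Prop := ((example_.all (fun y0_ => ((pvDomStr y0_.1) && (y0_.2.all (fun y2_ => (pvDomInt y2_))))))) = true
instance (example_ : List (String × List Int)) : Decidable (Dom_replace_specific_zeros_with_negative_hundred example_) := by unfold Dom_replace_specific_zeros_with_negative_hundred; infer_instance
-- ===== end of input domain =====

-- B replaces A's per-index neighbour test by a single pass over maximal runs of
-- consecutive zeros (marking each run of length ≥ 2, clamped to the interior);
-- objective: alternative decomposition, same cost.  Both A and B mutate the
-- caller's dict in Python; the equivalence proved here is about the return value.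

-- ===== PORT A =====
-- A's inner helper process_labels: scan i = 1 .. len-2, mark zeros with a zero neighbour
def pvProcessA (labels : List Int) : List Int :=
  (PySem.List.pyRange 1 ((labels.length : Int) - 1)).foldl
    (fun new_labels i =>
      if PySem.List.pyGetD labels i 0 = 0 ∧
         (PySem.List.pyGetD labels (i - 1) 0 = 0 ∨ PySem.List.pyGetD labels (i + 1) 0 = 0)
      then PySem.List.pySetD new_labels i (-100) else new_labels)
    labels

def replace_specific_zeros_with_negative_hundred (example_ : List (String × List Int)) : List (String × List Int) :=
  let d := PySem.Dict.mk example_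
  let text_labels := d.getD "text_labels" []    -- KeyError (missing key) is excluded by Pre_
  let audio_labels := d.getD "audio_labels" []
  (((d.insert "text_labels" (pvProcessA text_labels)).insert
      "audio_labels" (pvProcessA audio_labels)).items)

-- ===== PORT B =====
-- B's inner for-k loop: mark run [s, j) clamped to the interior [1, n-2]
def pvMarkRun (new_labels : List Int) (s j n : Int) : List Int :=
  (PySem.List.pyRange (max s 1) (min j (n - 1))).foldl
    (fun acc k => PySem.List.pySetD acc k (-100)) new_labels

-- one iteration of B's run-tracking loop (state = (run_start, new_labels))
def pvStepB (labels : List Int) (n : Int) (st : Option Int × List Int) (j : Int) :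
    Option Int × List Int :=
  if j < n ∧ PySem.List.pyGetD labels j 0 = 0 then
    match st.1 with
    | none => (some j, st.2)
    | some _ => st
  else
    match st.1 with
    | some s => (none, if 2 ≤ j - s then pvMarkRun st.2 s j n else st.2)
    | none => (none, st.2)

def pvProcessB (labels : List Int) : List Int :=
  ((PySem.List.pyRange 0 ((labels.length : Int) + 1)).foldl
      (pvStepB labels (labels.length : Int)) (none, labels)).2

def replace_specific_zeros_with_negative_hundred_alt (example_ : List (String × List Int)) : List (String × List Int) :=
  let d := PySem.Dict.mk example_
  let text_labels := d.getD "text_labels" []    -- KeyError (missing key) is excluded by Pre_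
  let audio_labels := d.getD "audio_labels" []
  (((d.insert "text_labels" (pvProcessB text_labels)).insert
      "audio_labels" (pvProcessB audio_labels)).items)

-- ===== PRECONDITION & SPEC =====
-- Pre_ excludes inputs missing either key, on which A raises KeyError (and so does B),
-- and association lists with duplicate keys, which a Python dict cannot represent.
def Pre_replace_specific_zeros_with_negative_hundred (example_ : List (String × List Int)) : Prop :=
  "text_labels" ∈ example_.map Prod.fst ∧ "audio_labels" ∈ example_.map Prod.fst ∧
  (example_.map Prod.fst).Nodup
instance (example_ : List (String × List Int)) : Decidable (Pre_replace_specific_zeros_with_negative_hundred example_) := by unfold Pre_replace_specific_zeros_with_negative_hundred; infer_instance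

def pvWitness_replace_specific_zeros_with_negative_hundred : (List (String × List Int)) :=
  [("text_labels", [5, 0, 0, 0, 7]), ("audio_labels", [0, 0])]

def Spec_replace_specific_zeros_with_negative_hundred (example_ : List (String × List Int)) (out : List (String × List Int)) : Prop := out = replace_specific_zeros_with_negative_hundred_alt example_
instance (example_ : List (String × List Int)) (out : List (String × List Int)) : Decidable (Spec_replace_specific_zeros_with_negative_hundred example_ out) := by unfold Spec_replace_specific_zeros_with_negative_hundred; infer_instance

-- ===== CLAIM (what is proved, stated in full; the proofs are below) =====
def Claim_equal_replace_specific_zeros_with_negative_hundred : Prop := ∀ (example_ : List (String × List Int)), Dom_replace_specific_zeros_with_negative_hundred example_ → Pre_replace_specific_zeros_with_negative_hundred example_ → Spec_replace_specific_zeros_with_negative_hundred example_ (replace_specific_zeros_with_negative_hundred example_)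

-- ===== LEMMAS AND PROOFS =====

-- the per-index marking condition both programs realise
def pvCond (l : List Int) (k : Nat) : Bool :=
  1 ≤ k ∧ k + 1 < l.length ∧ l.getD k 0 = 0 ∧
  (l.getD (k - 1) 0 = 0 ∨ l.getD (k + 1) 0 = 0)

-- a guarded set-fold over nonnegative indices, pointwise (A's loop shape)
theorem pv_markA_getElem? (f : Int → Prop) [DecidablePred f] (idxs : List Int)
    (h : ∀ i ∈ idxs, 0 ≤ i) (new : List Int) (k : Nat) :
    (idxs.foldl (fun nl i => if f i then PySem.List.pySetD nl i (-100) else nl) new)[k]? =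
      if ((k : Int) ∈ idxs ∧ f (k : Int)) then new[k]?.map (fun _ => (-100 : Int))
      else new[k]? := by
  induction idxs generalizing new with
  | nil => simp
  | cons i t ih =>
    have hi : 0 ≤ i := h i (by simp)
    have ht : ∀ x ∈ t, 0 ≤ x := fun x hx => h x (by simp [hx])
    simp only [List.foldl_cons, List.mem_cons]
    by_cases hf : f i
    · rw [if_pos hf, ih ht, PySem.List.pySetD_of_nonneg _ _ hi]
      simp only [List.getElem?_set]
      by_cases hk : (k : Int) = i
      · have hkt : i.toNat = k := by omega
        by_cases hlen : k < new.length
        · simp [hkt, hlen, hk, hf]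
        · have hn : new[k]? = none := List.getElem?_eq_none_iff.mpr (by omega)
          simp [hkt, hlen, hk, hf]
      · have hne : i.toNat ≠ k := by omega
        simp only [if_neg hne]
        by_cases hmem : ((k : Int) ∈ t ∧ f (k : Int))
        · have h2 : (((k : Int) = i ∨ (k : Int) ∈ t) ∧ f (k : Int)) := ⟨Or.inr hmem.1, hmem.2⟩
          simp only [if_pos hmem, if_pos h2]
        · have h2 : ¬ (((k : Int) = i ∨ (k : Int) ∈ t) ∧ f (k : Int)) := by tauto
          simp only [if_neg hmem, if_neg h2]
    · rw [if_neg hf, ih ht]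
      by_cases hmem : ((k : Int) ∈ t ∧ f (k : Int))
      · have h2 : (((k : Int) = i ∨ (k : Int) ∈ t) ∧ f (k : Int)) := ⟨Or.inr hmem.1, hmem.2⟩
        simp only [if_pos hmem, if_pos h2]
      · have h2 : ¬ (((k : Int) = i ∨ (k : Int) ∈ t) ∧ f (k : Int)) := by
          rintro ⟨hk | hk, hfk⟩
          · exact hf (hk ▸ hfk)
          · exact hmem ⟨hk, hfk⟩
        simp only [if_neg hmem, if_neg h2]

-- an unguarded set-fold over nonnegative indices, pointwise (B's inner loop shape)
theorem pv_markB_getElem? (idxs : List Int) (h : ∀ i ∈ idxs, 0 ≤ i) (new : List Int) (k : Nat) :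
    (idxs.foldl (fun acc i => PySem.List.pySetD acc i (-100)) new)[k]? =
      if ((k : Int) ∈ idxs) then new[k]?.map (fun _ => (-100 : Int)) else new[k]? := by
  have := pv_markA_getElem? (fun _ => True) idxs h new k
  simpa using this

theorem pv_getD_cast (l : List Int) (k : Nat) (hk : 1 ≤ k) :
    PySem.List.pyGetD l ((k : Int) - 1) 0 = l.getD (k - 1) 0 := by
  rw [show ((k : Int) - 1) = (((k - 1 : Nat)) : Int) by omega, PySem.List.pyGetD_natCast]

theorem pv_getD_cast' (l : List Int) (k : Nat) :
    PySem.List.pyGetD l ((k : Int) + 1) 0 = l.getD (k + 1) 0 := by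
  rw [show ((k : Int) + 1) = (((k + 1 : Nat)) : Int) by omega, PySem.List.pyGetD_natCast]

theorem pvProcessA_getElem? (l : List Int) (k : Nat) :
    (pvProcessA l)[k]? = if pvCond l k then some (-100) else l[k]? := by
  unfold pvProcessA
  rw [pv_markA_getElem? _ _
    (fun i hi => by have := PySem.List.mem_pyRange_one.mp hi; omega)]
  by_cases hc : pvCond l k = true
  · have hc' := hc
    simp only [pvCond, decide_eq_true_eq] at hc'
    obtain ⟨h1, h2, h3, h4⟩ := hc'
    have hmem : (k : Int) ∈ PySem.List.pyRange 1 ((l.length : Int) - 1) :=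
      PySem.List.mem_pyRange_one.mpr (by omega)
    have hf : PySem.List.pyGetD l (k : Int) 0 = 0 ∧
        (PySem.List.pyGetD l ((k : Int) - 1) 0 = 0 ∨ PySem.List.pyGetD l ((k : Int) + 1) 0 = 0) := by
      rw [PySem.List.pyGetD_natCast, pv_getD_cast l k h1, pv_getD_cast' l k]
      exact ⟨h3, h4⟩
    rw [if_pos ⟨hmem, hf⟩, if_pos hc]
    have hlen : k < l.length := by omega
    simp [List.getElem?_eq_getElem hlen]
  · rw [if_neg hc, if_neg]
    rintro ⟨hmem, hf0, hf1⟩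
    apply hc
    have hm := PySem.List.mem_pyRange_one.mp hmem
    have h1 : 1 ≤ k := by omega
    rw [PySem.List.pyGetD_natCast] at hf0
    rw [pv_getD_cast l k h1, pv_getD_cast' l k] at hf1
    simp only [pvCond, decide_eq_true_eq]
    exact ⟨h1, by omega, hf0, hf1⟩

-- B's run-start characterisation
def pvRS (l : List Int) (j : Nat) : Option Int → Prop
  | none => j = 0 ∨ (1 ≤ j ∧ j ≤ l.length ∧ l.getD (j - 1) 0 ≠ 0) ∨ j = l.length + 1
  | some s => ∃ sn : Nat, s = (sn : Int) ∧ sn < j ∧ j ≤ l.length ∧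
      (∀ m, sn ≤ m → m < j → l.getD m 0 = 0) ∧ (sn = 0 ∨ l.getD (sn - 1) 0 ≠ 0)

-- "the run containing k has been flushed by iteration j"
def pvEnded (l : List Int) (j k : Nat) : Bool :=
  (List.range j).any (fun e => k < e && (e == l.length || l.getD e 0 != 0))

theorem pvEnded_iff (l : List Int) (j k : Nat) :
    pvEnded l j k = true ↔ ∃ e, e < j ∧ k < e ∧ (e = l.length ∨ l.getD e 0 ≠ 0) := by
  simp [pvEnded, List.any_eq_true, List.mem_range]

theorem pv_ended_succ (l : List Int) (j k : Nat) :
    pvEnded l (j + 1) k = true ↔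
      (pvEnded l j k = true ∨ (k < j ∧ (j = l.length ∨ l.getD j 0 ≠ 0))) := by
  simp only [pvEnded_iff]
  constructor
  · rintro ⟨e, he, hk, hP⟩
    by_cases hej : e = j
    · subst hej; right; exact ⟨hk, hP⟩
    · left; exact ⟨e, by omega, hk, hP⟩
  · rintro (⟨e, he, hk, hP⟩ | ⟨hk, hP⟩)
    · exact ⟨e, by omega, hk, hP⟩
    · exact ⟨j, by omega, hk, hP⟩

-- k strictly left of an open run's start: the run boundary (or a contradiction) ends k's run before j
theorem pv_left (l : List Int) (sn j k : Nat) (hlt : k < sn) (hsj : sn < j)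
    (hb : sn = 0 ∨ l.getD (sn - 1) 0 ≠ 0) (h3 : l.getD k 0 = 0) : pvEnded l j k = true := by
  have hsn1 : 1 ≤ sn := by omega
  have hnz : l.getD (sn - 1) 0 ≠ 0 := by
    rcases hb with h | h
    · omega
    · exact h
  rcases Nat.lt_or_ge k (sn - 1) with hlt2 | hge2
  · exact (pvEnded_iff _ _ _).mpr ⟨sn - 1, by omega, hlt2, Or.inr hnz⟩
  · exact absurd h3 (by rw [show k = sn - 1 by omega]; exact hnz)

-- no open run at j (boundary nonzero): any marked-condition k < j already ended before j
theorem pv_c1 (l : List Int) (j k : Nat) (hb : j = 0 ∨ (1 ≤ j ∧ l.getD (j - 1) 0 ≠ 0))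
    (hC : pvCond l k = true) (hk : k < j) : pvEnded l j k = true := by
  simp only [pvCond, decide_eq_true_eq] at hC
  rcases hb with h0 | ⟨h1, hnz⟩
  · omega
  · rcases Nat.lt_or_ge k (j - 1) with hlt | hge
    · exact (pvEnded_iff _ _ _).mpr ⟨j - 1, by omega, hlt, Or.inr hnz⟩
    · exact absurd hC.2.2.1 (by rw [show k = j - 1 by omega]; exact hnz)

-- a run of length 1 flushed at j marks nothing new
theorem pv_c2 (l : List Int) (sn j k : Nat) (hsj : sn < j)
    (hb : sn = 0 ∨ l.getD (sn - 1) 0 ≠ 0)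
    (hshort : j = sn + 1)
    (hF : j = l.length ∨ l.getD j 0 ≠ 0)
    (hC : pvCond l k = true) (hk : k < j) : pvEnded l j k = true := by
  have hC' := hC
  simp only [pvCond, decide_eq_true_eq] at hC'
  obtain ⟨h1, h2, h3, h4⟩ := hC'
  rcases Nat.lt_or_ge k sn with hlt | hge
  · exact pv_left l sn j k hlt hsj hb h3
  · have hks : k = sn := by omega
    have hjlt : j < l.length := by omega
    have hnz1 : l.getD (k + 1) 0 ≠ 0 := by
      rw [show k + 1 = j by omega]
      rcases hF with h | h
      · omega
      · exact h
    rcases h4 with h | h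
    · rcases hb with h0 | hnz
      · omega
      · exact absurd h (by rw [show k - 1 = sn - 1 by omega]; exact hnz)
    · exact absurd h hnz1

-- a run of length ≥ 2 flushed at j: a condition-k < j is either already ended or inside the clamp
theorem pv_c3 (l : List Int) (sn j k : Nat) (hsj : sn < j)
    (hb : sn = 0 ∨ l.getD (sn - 1) 0 ≠ 0)
    (hC : pvCond l k = true) (hk : k < j) :
    pvEnded l j k = true ∨ (max sn 1 ≤ k ∧ k < min j (l.length - 1)) := by
  simp only [pvCond, decide_eq_true_eq] at hC
  obtain ⟨h1, h2, h3, h4⟩ := hC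
  rcases Nat.lt_or_ge k sn with hlt | hge
  · exact Or.inl (pv_left l sn j k hlt hsj hb h3)
  · right; omega

-- every index in the clamped interval of a flushed run of length ≥ 2 satisfies the condition
theorem pv_c4 (l : List Int) (sn j k : Nat) (hjn : j ≤ l.length)
    (hz : ∀ m, sn ≤ m → m < j → l.getD m 0 = 0)
    (hlong : sn + 2 ≤ j)
    (hk1 : max sn 1 ≤ k) (hk2 : k < min j (l.length - 1)) : pvCond l k = true := by
  simp only [pvCond, decide_eq_true_eq]
  refine ⟨by omega, by omega, hz k (by omega) (by omega), ?_⟩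
  rcases Nat.lt_or_ge (k + 1) j with h | h
  · exact Or.inr (hz (k + 1) (by omega) h)
  · exact Or.inl (hz (k - 1) (by omega) (by omega))

theorem pv_c0 (l : List Int) (j k : Nat) (h1 : j < l.length) (h2 : l.getD j 0 = 0) :
    (pvEnded l (j + 1) k = true) ↔ (pvEnded l j k = true) := by
  rw [pv_ended_succ]
  constructor
  · rintro (h | ⟨hk, h | h⟩)
    · exact h
    · omega
    · exact absurd h2 h
  · exact Or.inl

theorem pv_step_iff (l : List Int) (j k : Nat)
    (h : k < j → pvCond l k = true → pvEnded l j k = true) :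
    ((pvCond l k = true ∧ pvEnded l (j + 1) k = true) ↔
      (pvCond l k = true ∧ pvEnded l j k = true)) := by
  constructor
  · rintro ⟨hC, hE⟩
    rcases (pv_ended_succ l j k).mp hE with hh | ⟨hk, _⟩
    · exact ⟨hC, hh⟩
    · exact ⟨hC, h hk hC⟩
  · rintro ⟨hC, hE⟩; exact ⟨hC, (pv_ended_succ l j k).mpr (Or.inl hE)⟩

theorem pv_rs_flush (l : List Int) (j : Nat) (hjle : j ≤ l.length)
    (hF : j = l.length ∨ l.getD j 0 ≠ 0) : pvRS l (j + 1) none := by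
  by_cases hjl : j = l.length
  · exact Or.inr (Or.inr (by omega))
  · rcases hF with h | h
    · omega
    · exact Or.inr (Or.inl ⟨by omega, by omega, h⟩)

theorem pv_invB (l : List Int) (j : Nat) (hj : j ≤ l.length + 1) :
    (∀ k : Nat,
        (((PySem.List.pyRange 0 (j : Int)).foldl (pvStepB l (l.length : Int)) (none, l)).2)[k]? =
          if pvCond l k ∧ pvEnded l j k then some (-100) else l[k]?) ∧
    pvRS l j (((PySem.List.pyRange 0 (j : Int)).foldl (pvStepB l (l.length : Int)) (none, l)).1) := by
  induction j with
  | zero =>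
    have hr : PySem.List.pyRange 0 ((0 : Nat) : Int) = [] := by decide
    rw [hr]
    refine ⟨fun k => ?_, Or.inl rfl⟩
    have hE : ¬ (pvCond l k = true ∧ pvEnded l 0 k = true) := by
      rintro ⟨-, hE⟩; simp [pvEnded] at hE
    rw [if_neg hE]
    rfl
  | succ j ih =>
    obtain ⟨ihOut, ihRS⟩ := ih (by omega)
    have hjle : j ≤ l.length := by omega
    have hr : PySem.List.pyRange 0 ((j + 1 : Nat) : Int) =
        PySem.List.pyRange 0 (j : Int) ++ [(j : Int)] := by
      rw [show (((j + 1 : Nat)) : Int) = (j : Int) + 1 by push_cast; ring]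
      exact PySem.List.pyRange_one_succ_right (by positivity)
    have hPiff : (((j : Int) < ((l.length : Nat) : Int)) ∧ PySem.List.pyGetD l (j : Int) 0 = 0) ↔
        (j < l.length ∧ l.getD j 0 = 0) := by
      rw [PySem.List.pyGetD_natCast]
      constructor
      · rintro ⟨a, b⟩; exact ⟨by exact_mod_cast a, b⟩
      · rintro ⟨a, b⟩; exact ⟨by exact_mod_cast a, b⟩
    rcases hstq : (PySem.List.pyRange 0 (j : Int)).foldl (pvStepB l (l.length : Int)) (none, l)
      with ⟨o, out⟩
    rw [hstq] at ihOut ihRS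
    rw [hr, List.foldl_append, List.foldl_cons, List.foldl_nil, hstq]
    dsimp only at ihOut ihRS ⊢
    cases o with
    | none =>
      by_cases hP : (j < l.length ∧ l.getD j 0 = 0)
      · rw [pvStepB, if_pos (hPiff.mpr hP)]
        dsimp only
        constructor
        · intro k
          rw [ihOut k]
          exact (if_congr (and_congr_right fun _ => pv_c0 l j k hP.1 hP.2) rfl rfl).symm
        · refine ⟨j, rfl, by omega, by omega, fun m hm1 hm2 => ?_, ?_⟩
          · rw [show m = j by omega]; exact hP.2
          · rcases ihRS with h0 | ⟨h1, h2, h3⟩ | hN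
            · exact Or.inl h0
            · exact Or.inr h3
            · omega
      · rw [pvStepB, if_neg (fun hh => hP (hPiff.mp hh))]
        dsimp only
        have hF : j = l.length ∨ l.getD j 0 ≠ 0 := by
          by_cases hjl : j = l.length
          · exact Or.inl hjl
          · right; intro hz0; exact hP ⟨by omega, hz0⟩
        have hb : j = 0 ∨ (1 ≤ j ∧ l.getD (j - 1) 0 ≠ 0) := by
          rcases ihRS with h | ⟨a, b, c⟩ | h
          · exact Or.inl h
          · exact Or.inr ⟨a, c⟩
          · omega
        constructor
        · intro k
          rw [ihOut k]
          exact (if_congr (pv_step_iff l j k (fun hk hC => pv_c1 l j k hb hC hk)) rfl rfl).symm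
        · exact pv_rs_flush l j hjle hF
    | some s =>
      obtain ⟨sn, rfl, hsj, hjn, hz, hb⟩ := ihRS
      by_cases hP : (j < l.length ∧ l.getD j 0 = 0)
      · rw [pvStepB, if_pos (hPiff.mpr hP)]
        dsimp only
        constructor
        · intro k
          rw [ihOut k]
          exact (if_congr (and_congr_right fun _ => pv_c0 l j k hP.1 hP.2) rfl rfl).symm
        · refine ⟨sn, rfl, by omega, by omega, fun m hm1 hm2 => ?_, hb⟩
          by_cases hmj : m = j
          · rw [hmj]; exact hP.2
          · exact hz m hm1 (by omega)
      · rw [pvStepB, if_neg (fun hh => hP (hPiff.mp hh))]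
        dsimp only
        have hF : j = l.length ∨ l.getD j 0 ≠ 0 := by
          by_cases hjl : j = l.length
          · exact Or.inl hjl
          · right; intro hz0; exact hP ⟨by omega, hz0⟩
        by_cases hL : sn + 2 ≤ j
        · rw [if_pos (show (2 : Int) ≤ (j : Int) - (sn : Int) by omega)]
          refine ⟨fun k => ?_, pv_rs_flush l j hjle hF⟩
          unfold pvMarkRun
          rw [pv_markB_getElem? _
            (fun i hi => by
              have h1 := PySem.List.mem_pyRange_one.mp hi
              have h2 := le_max_right ((sn : Nat) : Int) 1
              omega) out k]
          have hmem : ((k : Int) ∈ PySem.List.pyRange (max ((sn : Nat) : Int) 1)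
              (min ((j : Nat) : Int) (((l.length : Nat) : Int) - 1))) ↔
              (max sn 1 ≤ k ∧ k < min j (l.length - 1)) := by
            rw [PySem.List.mem_pyRange_one]
            constructor <;> intro h <;> constructor <;> omega
          by_cases hk : (max sn 1 ≤ k ∧ k < min j (l.length - 1))
          · rw [if_pos (hmem.mpr hk), ihOut k]
            have hC := pv_c4 l sn j k hjn hz hL hk.1 hk.2
            have hE1 : pvEnded l (j + 1) k = true :=
              (pvEnded_iff _ _ _).mpr ⟨j, by omega, by omega, hF⟩
            rw [if_pos (show pvCond l k = true ∧ pvEnded l (j + 1) k = true from ⟨hC, hE1⟩)]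
            by_cases hcj : (pvCond l k = true ∧ pvEnded l j k = true)
            · rw [if_pos hcj]; rfl
            · rw [if_neg hcj]
              have hklen : k < l.length := by omega
              rw [List.getElem?_eq_getElem hklen]; rfl
          · rw [if_neg (fun hh => hk (hmem.mp hh)), ihOut k]
            refine (if_congr (pv_step_iff l j k (fun hkj hC => ?_)) rfl rfl).symm
            rcases pv_c3 l sn j k hsj hb hC hkj with h | h
            · exact h
            · exact absurd h hk
        · rw [if_neg (show ¬ (2 : Int) ≤ (j : Int) - (sn : Int) by omega)]
          refine ⟨fun k => ?_, pv_rs_flush l j hjle hF⟩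
          rw [ihOut k]
          exact (if_congr (pv_step_iff l j k
            (fun hk hC => pv_c2 l sn j k hsj hb (by omega) hF hC hk)) rfl rfl).symm

theorem pvProcessB_getElem? (l : List Int) (k : Nat) :
    (pvProcessB l)[k]? = if pvCond l k then some (-100) else l[k]? := by
  unfold pvProcessB
  have h := (pv_invB l (l.length + 1) (by omega)).1 k
  rw [Nat.cast_add, Nat.cast_one] at h
  rw [h]
  refine if_congr ?_ rfl rfl
  constructor
  · rintro ⟨hC, -⟩; exact hC
  · intro hC
    have hC' := hC
    simp only [pvCond, decide_eq_true_eq] at hC'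
    exact ⟨hC, (pvEnded_iff _ _ _).mpr ⟨l.length, by omega, by omega, Or.inl rfl⟩⟩

theorem pvProcess_eq (l : List Int) : pvProcessA l = pvProcessB l := by
  apply List.ext_getElem?
  intro k
  rw [pvProcessA_getElem?, pvProcessB_getElem?]

-- ===== VERDICT (by name: the statement is the Claim_ definition above) =====
theorem replace_specific_zeros_with_negative_hundred_spec : Claim_equal_replace_specific_zeros_with_negative_hundred := by
  intro example_ _ _
  unfold Spec_replace_specific_zeros_with_negative_hundred
  unfold replace_specific_zeros_with_negative_hundred replace_specific_zeros_with_negative_hundred_alt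
  simp only [pvProcess_eq]
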